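-- pv_equiv track=rewrite | github.com/RobinHoodi349/litter-detection | src/litter_detection/agent/pathPlanerAgent.py | _nearest_free
-- ===== SOURCE A (Python) =====
-- def _nearest_free(
--     cell: tuple[int, int],
--     occupied: set[tuple[int, int]],
--     x_bounds: tuple[int, int],
--     y_bounds: tuple[int, int],
--     max_r: int = 5,
-- ) -> tuple[int, int]:
--     """Return cell itself or nearest non-occupied cell within max_r steps."""
--     if cell not in occupied:
--         return cell
--     x_min, x_max = x_bounds
--     y_min, y_max = y_bounds
--     for r in range(1, max_r + 1):
--         for dx in range(-r, r + 1):
--             for dy in range(-r, r + 1):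
--                 if abs(dx) != r and abs(dy) != r:
--                     continue
--                 nb = (cell[0] + dx, cell[1] + dy)
--                 if not (x_min <= nb[0] <= x_max and y_min <= nb[1] <= y_max):
--                     continue
--                 if nb not in occupied:
--                     return nb
--     return cell
-- ===== SOURCE B (Python) =====
-- def _nearest_free(
--     cell,
--     occupied,
--     x_bounds,
--     y_bounds,
--     max_r=5,
-- ):
--     """Return cell itself or nearest non-occupied cell within max_r steps."""
--     if cell not in occupied:
--         return cell
--     x, y = cell
--     cands = [
--         (dx, dy)
--         for dx in range(-max_r, max_r + 1)
--         for dy in range(-max_r, max_r + 1)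
--         if x_bounds[0] <= x + dx <= x_bounds[1]
--         and y_bounds[0] <= y + dy <= y_bounds[1]
--         and (x + dx, y + dy) not in occupied
--     ]
--     if not cands:
--         return cell
--     dx, dy = min(cands, key=lambda o: (max(abs(o[0]), abs(o[1])), o[0], o[1]))
--     return (x + dx, y + dy)
-- ===== Notes on version B (the rewrite author's own statement) =====
-- stated objective: alternative
-- what changed: Replaces A's expanding-ring triple loop with early return by one collect-all-free-candidates pass over the (2*max_r+1)^2 offset square followed by a single min() with key (Chebyshev distance, dx, dy), which reproduces A's ring/dx/dy precedence.
import Mathlib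
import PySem

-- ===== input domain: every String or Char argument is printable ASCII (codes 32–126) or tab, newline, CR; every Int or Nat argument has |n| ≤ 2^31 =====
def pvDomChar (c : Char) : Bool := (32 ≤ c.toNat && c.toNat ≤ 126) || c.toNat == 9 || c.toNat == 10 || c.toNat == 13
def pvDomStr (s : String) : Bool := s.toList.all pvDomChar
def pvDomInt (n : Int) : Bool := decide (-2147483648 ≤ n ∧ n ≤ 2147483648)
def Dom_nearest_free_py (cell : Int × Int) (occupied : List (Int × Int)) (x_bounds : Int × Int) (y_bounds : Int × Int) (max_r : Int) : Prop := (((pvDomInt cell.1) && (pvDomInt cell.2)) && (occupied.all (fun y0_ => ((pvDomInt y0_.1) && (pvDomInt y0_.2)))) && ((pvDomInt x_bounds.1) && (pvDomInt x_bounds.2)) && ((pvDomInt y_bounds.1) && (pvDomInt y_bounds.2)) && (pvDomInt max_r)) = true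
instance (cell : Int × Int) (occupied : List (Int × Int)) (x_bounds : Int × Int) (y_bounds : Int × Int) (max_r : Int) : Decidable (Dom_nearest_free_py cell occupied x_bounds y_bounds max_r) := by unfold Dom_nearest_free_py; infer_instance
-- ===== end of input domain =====

-- B replaces A's expanding-ring scan with early return by one collect-all-free-candidates pass
-- followed by a single min over the key (Chebyshev distance, dx, dy); same cost, different decomposition.

-- ===== PORT A =====
-- literal transliteration of A: early return 'cell' if free, then nested loops
-- r / dx / dy with 'continue' and early return, encoded with findSome? (the
-- standard loop-with-early-return shape).
def nearest_free_py (cell : Int × Int) (occupied : List (Int × Int)) (x_bounds : Int × Int) (y_bounds : Int × Int) (max_r : Int) : Int × Int :=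
  if cell ∉ occupied then cell
  else
    -- x_min, x_max = x_bounds; y_min, y_max = y_bounds (written inline)
    match (PySem.List.pyRange 1 (max_r + 1) 1).findSome? (fun r =>
      (PySem.List.pyRange (-r) (r + 1) 1).findSome? (fun dx =>
        (PySem.List.pyRange (-r) (r + 1) 1).findSome? (fun dy =>
          if |dx| ≠ r ∧ |dy| ≠ r then none          -- continue
          else if ¬ (x_bounds.1 ≤ cell.1 + dx ∧ cell.1 + dx ≤ x_bounds.2 ∧
                     y_bounds.1 ≤ cell.2 + dy ∧ cell.2 + dy ≤ y_bounds.2) then none  -- continue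
          else if (cell.1 + dx, cell.2 + dy) ∉ occupied then some (cell.1 + dx, cell.2 + dy)
          else none))) with
    | some nb => nb
    | none => cell

-- ===== PORT B =====
-- exact port of Python tuple '<' on int triples (lexicographic), used by min's key comparison
def nfLtKey (a b : Int × Int × Int) : Bool :=
  decide (a.1 < b.1 ∨ (a.1 = b.1 ∧ (a.2.1 < b.2.1 ∨ (a.2.1 = b.2.1 ∧ a.2.2 < b.2.2))))

-- key=lambda o: (max(abs(o[0]), abs(o[1])), o[0], o[1])
def nfKey (o : Int × Int) : Int × Int × Int := (max |o.1| |o.2|, o.1, o.2)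

def nearest_free_py_alt (cell : Int × Int) (occupied : List (Int × Int)) (x_bounds : Int × Int) (y_bounds : Int × Int) (max_r : Int) : Int × Int :=
  if cell ∉ occupied then cell
  else
    -- x, y = cell (written inline); 'match' on the comprehension = the cands list ('if not cands')
    match (PySem.List.pyRange (-max_r) (max_r + 1) 1).flatMap (fun dx =>
      (PySem.List.pyRange (-max_r) (max_r + 1) 1).filterMap (fun dy =>
        if x_bounds.1 ≤ cell.1 + dx ∧ cell.1 + dx ≤ x_bounds.2 ∧
            y_bounds.1 ≤ cell.2 + dy ∧ cell.2 + dy ≤ y_bounds.2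
            ∧ (cell.1 + dx, cell.2 + dy) ∉ occupied
        then some (dx, dy) else none)) with
    | [] => cell
    | c :: t =>
      -- min(cands, key=…): left fold keeping the first minimum (exact for Python min)
      let m := t.foldl (fun acc o => if nfLtKey (nfKey o) (nfKey acc) then o else acc) c
      (cell.1 + m.1, cell.2 + m.2)

-- ===== PRECONDITION & SPEC =====
def Spec_nearest_free_py (cell : Int × Int) (occupied : List (Int × Int)) (x_bounds : Int × Int) (y_bounds : Int × Int) (max_r : Int) (out : Int × Int) : Prop := out = nearest_free_py_alt cell occupied x_bounds y_bounds max_r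
instance (cell : Int × Int) (occupied : List (Int × Int)) (x_bounds : Int × Int) (y_bounds : Int × Int) (max_r : Int) (out : Int × Int) : Decidable (Spec_nearest_free_py cell occupied x_bounds y_bounds max_r out) := by unfold Spec_nearest_free_py; infer_instance

-- ===== CLAIM (what is proved, stated in full; the proofs are below) =====
def Claim_equal_nearest_free_py : Prop := ∀ (cell : Int × Int) (occupied : List (Int × Int)) (x_bounds : Int × Int) (y_bounds : Int × Int) (max_r : Int), Dom_nearest_free_py cell occupied x_bounds y_bounds max_r → Spec_nearest_free_py cell occupied x_bounds y_bounds max_r (nearest_free_py cell occupied x_bounds y_bounds max_r)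

-- ===== LEMMAS AND PROOFS =====

-- the shared candidate predicate: neighbour cell in bounds and free
def nfCand (cell : Int × Int) (occupied : List (Int × Int)) (x_bounds : Int × Int) (y_bounds : Int × Int) (o : Int × Int) : Bool :=
  decide (x_bounds.1 ≤ cell.1 + o.1 ∧ cell.1 + o.1 ≤ x_bounds.2 ∧ y_bounds.1 ≤ cell.2 + o.2 ∧ cell.2 + o.2 ≤ y_bounds.2 ∧ (cell.1 + o.1, cell.2 + o.2) ∉ occupied)

-- the offsets A visits for a given radius r, in A's order
def nfRing (r : Int) : List (Int × Int) :=
  (PySem.List.pyRange (-r) (r + 1) 1).flatMap (fun dx =>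
    ((PySem.List.pyRange (-r) (r + 1) 1).filter (fun dy => decide (¬ (|dx| ≠ r ∧ |dy| ≠ r)))).map (fun dy => (dx, dy)))

-- all offsets A visits, in A's order
def nfLA (max_r : Int) : List (Int × Int) :=
  (PySem.List.pyRange 1 (max_r + 1) 1).flatMap nfRing

-- all offsets B visits, in B's order
def nfLB (max_r : Int) : List (Int × Int) :=
  (PySem.List.pyRange (-max_r) (max_r + 1) 1).flatMap (fun dx =>
    (PySem.List.pyRange (-max_r) (max_r + 1) 1).map (fun dy => (dx, dy)))

-- strict lexicographic order on keys, as a Prop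
def nfLt (a b : Int × Int) : Prop := nfLtKey (nfKey a) (nfKey b) = true

lemma nfLt_irrefl (a : Int × Int) : ¬ nfLt a a := by
  simp [nfLt, nfLtKey]

lemma nfLt_trans {a b c : Int × Int} (h1 : nfLt a b) (h2 : nfLt b c) : nfLt a c := by
  obtain ⟨p1, p2, p3⟩ := nfKey a
  obtain ⟨q1, q2, q3⟩ := nfKey b
  obtain ⟨r1, r2, r3⟩ := nfKey c
  simp only [nfLt, nfLtKey, decide_eq_true_iff] at *
  omega

lemma nfLt_of_not_lt_of_lt {a b c : Int × Int} (h1 : ¬ nfLt b a) (h2 : nfLt b c) : nfLt a c := by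
  obtain ⟨p1, p2, p3⟩ := nfKey a
  obtain ⟨q1, q2, q3⟩ := nfKey b
  obtain ⟨r1, r2, r3⟩ := nfKey c
  simp only [nfLt, nfLtKey, decide_eq_true_iff] at *
  omega

lemma nfLt_ne {a b : Int × Int} (h : nfLt a b) : a ≠ b := by
  rintro rfl; exact nfLt_irrefl a h

-- findSome? plumbing
lemma findSome?_flatMap {α β γ : Type} (l : List α) (f : α → List β) (g : β → Option γ) :
    (l.flatMap f).findSome? g = l.findSome? (fun x => (f x).findSome? g) := by
  induction l with
  | nil => rfl
  | cons a t ih =>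
    simp only [List.flatMap_cons, List.findSome?_append, List.findSome?_cons, ih]
    cases (f a).findSome? g <;> rfl

lemma findSome?_filter {α γ : Type} (l : List α) (p : α → Prop) [DecidablePred p] (g : α → Option γ) :
    (l.filter (fun x => decide (p x))).findSome? g = l.findSome? (fun x => if p x then g x else none) := by
  induction l with
  | nil => rfl
  | cons a t ih =>
    by_cases h : p a
    · simp [h, List.findSome?_cons, ih]
    · simp [h, ih]

lemma findSome?_if_eq_find? {α γ : Type} (l : List α) (p : α → Prop) [DecidablePred p] (g : α → γ) :
    l.findSome? (fun x => if p x then some (g x) else none) = (l.find? (fun x => decide (p x))).map g := by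
  induction l with
  | nil => rfl
  | cons a t ih =>
    by_cases h : p a <;> simp [h, ih]

lemma filterMap_if_eq_map_filter {α γ : Type} (l : List α) (p : α → Prop) [DecidablePred p] (g : α → γ) :
    l.filterMap (fun x => if p x then some (g x) else none) = (l.filter (fun x => decide (p x))).map g := by
  induction l with
  | nil => rfl
  | cons a t ih =>
    by_cases h : p a <;> simp [h, ih]

-- membership characterisations
lemma mem_nfRing {r : Int} {o : Int × Int} :
    o ∈ nfRing r ↔ (-r ≤ o.1 ∧ o.1 ≤ r ∧ -r ≤ o.2 ∧ o.2 ≤ r ∧ (|o.1| = r ∨ |o.2| = r)) := by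
  obtain ⟨dx, dy⟩ := o
  simp only [nfRing, List.mem_flatMap, List.mem_map, List.mem_filter,
    PySem.List.mem_pyRange_one, decide_eq_true_iff]
  constructor
  · rintro ⟨a, ⟨ha1, ha2⟩, b, ⟨⟨hb1, hb2⟩, hb3⟩, rfl, rfl⟩
    simp only [Int.abs_eq_natAbs] at *
    omega
  · rintro ⟨h1, h2, h3, h4, h5⟩
    refine ⟨dx, ?_, dy, ⟨⟨?_, ?_⟩, ?_⟩, rfl⟩ <;>
      simp only [Int.abs_eq_natAbs] at * <;> omega

lemma cheb_eq_iff {a b r : Int} : max |a| |b| = r ↔ (|a| ≤ r ∧ |b| ≤ r ∧ (|a| = r ∨ |b| = r)) := by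
  rcases le_total |a| |b| with h | h <;> simp [h] <;> omega

lemma cheb_of_mem_nfRing {r : Int} {o : Int × Int} (h : o ∈ nfRing r) : max |o.1| |o.2| = r := by
  rw [mem_nfRing] at h
  rw [cheb_eq_iff]
  simp only [Int.abs_eq_natAbs] at *
  omega

lemma mem_nfLA {max_r : Int} {o : Int × Int} :
    o ∈ nfLA max_r ↔ 1 ≤ max |o.1| |o.2| ∧ max |o.1| |o.2| ≤ max_r := by
  simp only [nfLA, List.mem_flatMap, PySem.List.mem_pyRange_one]
  constructor
  · rintro ⟨r, ⟨hr1, hr2⟩, hm⟩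
    have := cheb_of_mem_nfRing hm
    rw [this]
    omega
  · rintro ⟨h1, h2⟩
    refine ⟨max |o.1| |o.2|, ⟨h1, by omega⟩, ?_⟩
    rw [mem_nfRing]
    have := cheb_eq_iff (a := o.1) (b := o.2) (r := max |o.1| |o.2|)
    simp only [Int.abs_eq_natAbs] at *
    omega

lemma mem_nfLB {max_r : Int} {o : Int × Int} :
    o ∈ nfLB max_r ↔ |o.1| ≤ max_r ∧ |o.2| ≤ max_r := by
  obtain ⟨dx, dy⟩ := o
  simp only [nfLB, List.mem_flatMap, List.mem_map, PySem.List.mem_pyRange_one]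
  constructor
  · rintro ⟨a, ⟨ha1, ha2⟩, b, ⟨hb1, hb2⟩, rfl, rfl⟩
    simp only [Int.abs_eq_natAbs] at *
    omega
  · rintro ⟨h1, h2⟩
    refine ⟨dx, ?_, dy, ?_, rfl⟩ <;> simp only [Int.abs_eq_natAbs] at * <;> omega

-- order facts
lemma pairwise_lex_nfRing (r : Int) :
    (nfRing r).Pairwise (fun a b => a.1 < b.1 ∨ (a.1 = b.1 ∧ a.2 < b.2)) := by
  rw [nfRing, List.pairwise_flatMap]
  constructor
  · intro dx _
    rw [List.pairwise_map]
    exact ((PySem.List.pairwise_lt_pyRange_one _ _).filter _).imp (fun h => Or.inr ⟨rfl, h⟩)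
  · refine (PySem.List.pairwise_lt_pyRange_one _ _).imp ?_
    intro a b hab x hx y hy
    simp only [List.mem_map, List.mem_filter] at hx hy
    obtain ⟨_, _, rfl⟩ := hx
    obtain ⟨_, _, rfl⟩ := hy
    exact Or.inl hab

lemma pairwise_nfRing (r : Int) : (nfRing r).Pairwise nfLt := by
  refine (pairwise_lex_nfRing r).imp_of_mem ?_
  intro a b ha hb h
  have ca := cheb_of_mem_nfRing ha
  have cb := cheb_of_mem_nfRing hb
  simp only [nfLt, nfLtKey, nfKey, decide_eq_true_iff]
  rw [ca, cb]
  rcases h with h | ⟨e, h⟩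
  · exact Or.inr ⟨rfl, Or.inl h⟩
  · exact Or.inr ⟨rfl, Or.inr ⟨e, h⟩⟩

lemma pairwise_nfLA (max_r : Int) : (nfLA max_r).Pairwise nfLt := by
  rw [nfLA, List.pairwise_flatMap]
  refine ⟨fun r _ => pairwise_nfRing r, ?_⟩
  refine (PySem.List.pairwise_lt_pyRange_one _ _).imp ?_
  intro r1 r2 h x hx y hy
  have cx := cheb_of_mem_nfRing hx
  have cy := cheb_of_mem_nfRing hy
  simp only [nfLt, nfLtKey, nfKey, decide_eq_true_iff]
  rw [cx, cy]
  exact Or.inl h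

lemma pairwise_lex_nfLB (max_r : Int) :
    (nfLB max_r).Pairwise (fun a b => a.1 < b.1 ∨ (a.1 = b.1 ∧ a.2 < b.2)) := by
  rw [nfLB, List.pairwise_flatMap]
  constructor
  · intro dx _
    rw [List.pairwise_map]
    exact (PySem.List.pairwise_lt_pyRange_one _ _).imp (fun h => Or.inr ⟨rfl, h⟩)
  · refine (PySem.List.pairwise_lt_pyRange_one _ _).imp ?_
    intro a b hab x hx y hy
    simp only [List.mem_map] at hx hy
    obtain ⟨_, _, rfl⟩ := hx
    obtain ⟨_, _, rfl⟩ := hy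
    exact Or.inl hab

lemma nodup_nfLA (max_r : Int) : (nfLA max_r).Nodup :=
  (pairwise_nfLA max_r).imp (fun h => nfLt_ne h)

lemma nodup_nfLB (max_r : Int) : (nfLB max_r).Nodup := by
  refine (pairwise_lex_nfLB max_r).imp (fun {a b} h => ?_)
  rintro rfl
  rcases h with h | ⟨_, h⟩ <;> exact absurd rfl (ne_of_lt h)

-- the minimum fold
lemma minF_spec (t : List (Int × Int)) (c : Int × Int) :
    (t.foldl (fun acc o => if nfLtKey (nfKey o) (nfKey acc) then o else acc) c) ∈ c :: t ∧
    ∀ y ∈ c :: t, ¬ nfLt y (t.foldl (fun acc o => if nfLtKey (nfKey o) (nfKey acc) then o else acc) c) := by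
  induction t generalizing c with
  | nil => exact ⟨List.mem_singleton_self c, by simpa using nfLt_irrefl c⟩
  | cons x t ih =>
    simp only [List.foldl_cons]
    obtain ⟨ih1, ih2⟩ := ih (if nfLtKey (nfKey x) (nfKey c) then x else c)
    constructor
    · by_cases hxc : nfLtKey (nfKey x) (nfKey c) = true
      · rw [if_pos hxc] at ih1 ⊢
        rcases List.mem_cons.mp ih1 with h | h <;> simp [h]
      · rw [if_neg hxc] at ih1 ⊢
        rcases List.mem_cons.mp ih1 with h | h <;> simp [h]
    · intro y hy
      by_cases hxc : nfLtKey (nfKey x) (nfKey c) = true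
      · rw [if_pos hxc] at ih1 ih2 ⊢
        rcases List.mem_cons.mp hy with rfl | hy'
        · intro hlt
          exact ih2 x List.mem_cons_self (nfLt_trans hxc hlt)
        · exact ih2 y hy'
      · rw [if_neg hxc] at ih1 ih2 ⊢
        rcases List.mem_cons.mp hy with rfl | hy'
        · exact ih2 y List.mem_cons_self
        · rcases List.mem_cons.mp hy' with rfl | hy''
          · intro hlt
            exact ih2 c List.mem_cons_self (nfLt_of_not_lt_of_lt hxc hlt)
          · exact ih2 y (List.mem_cons_of_mem _ hy'')

lemma minF_eq_head {l t : List (Int × Int)} {c m : Int × Int}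
    (hperm : (c :: l).Perm (m :: t)) (hpw : (m :: t).Pairwise nfLt) :
    (l.foldl (fun acc o => if nfLtKey (nfKey o) (nfKey acc) then o else acc) c) = m := by
  obtain ⟨hmem, hmin⟩ := minF_spec l c
  set res := l.foldl (fun acc o => if nfLtKey (nfKey o) (nfKey acc) then o else acc) c
  have hres : res ∈ m :: t := hperm.mem_iff.mp hmem
  rcases List.mem_cons.mp hres with h | h
  · exact h
  · exact absurd ((List.pairwise_cons.mp hpw).1 res h)
      (hmin m (hperm.mem_iff.mpr (List.mem_cons_self)))

-- Chebyshev helpers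
lemma cheb_le_iff {a b r : Int} : max |a| |b| ≤ r ↔ |a| ≤ r ∧ |b| ≤ r := max_le_iff

lemma one_le_cheb {a b : Int} (h : ¬ (a = 0 ∧ b = 0)) : 1 ≤ max |a| |b| := by
  rcases le_total |a| |b| with hh | hh <;>
    [rw [max_eq_right hh]; rw [max_eq_left hh]] <;>
    simp only [Int.abs_eq_natAbs] at * <;> omega

-- ===== VERDICT (by name: the statement is the Claim_ definition above) =====
theorem nearest_free_py_spec : Claim_equal_nearest_free_py := by
  intro cell occ xb yb mr _
  unfold Spec_nearest_free_py nearest_free_py nearest_free_py_alt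
  by_cases hocc : cell ∈ occ
  · rw [if_neg (not_not_intro hocc), if_neg (not_not_intro hocc)]
    have hA : ((PySem.List.pyRange 1 (mr + 1) 1).findSome? (fun r =>
        (PySem.List.pyRange (-r) (r + 1) 1).findSome? (fun dx =>
          (PySem.List.pyRange (-r) (r + 1) 1).findSome? (fun dy =>
            if |dx| ≠ r ∧ |dy| ≠ r then none
            else if ¬ (xb.1 ≤ cell.1 + dx ∧ cell.1 + dx ≤ xb.2 ∧
                       yb.1 ≤ cell.2 + dy ∧ cell.2 + dy ≤ yb.2) then none
            else if (cell.1 + dx, cell.2 + dy) ∉ occ then some (cell.1 + dx, cell.2 + dy)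
            else none))))
        = (((nfLA mr).filter (nfCand cell occ xb yb)).head?).map
            (fun o => (cell.1 + o.1, cell.2 + o.2)) := by
      rw [List.head?_filter]
      rw [show nfCand cell occ xb yb = (fun o : Int × Int => decide (xb.1 ≤ cell.1 + o.1 ∧
          cell.1 + o.1 ≤ xb.2 ∧ yb.1 ≤ cell.2 + o.2 ∧ cell.2 + o.2 ≤ yb.2 ∧
          (cell.1 + o.1, cell.2 + o.2) ∉ occ)) from rfl]
      rw [← findSome?_if_eq_find?]
      rw [nfLA, findSome?_flatMap]
      congr 1
      funext r
      rw [nfRing, findSome?_flatMap]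
      congr 1
      funext dx
      rw [List.findSome?_map, findSome?_filter]
      congr 1
      funext dy
      dsimp only [Function.comp]
      by_cases h1 : |dx| ≠ r ∧ |dy| ≠ r
      · rw [if_pos h1, if_neg (not_not_intro h1)]
      · rw [if_neg h1, if_pos h1]
        by_cases h2 : xb.1 ≤ cell.1 + dx ∧ cell.1 + dx ≤ xb.2 ∧
            yb.1 ≤ cell.2 + dy ∧ cell.2 + dy ≤ yb.2
        · by_cases h3 : (cell.1 + dx, cell.2 + dy) ∈ occ
          · simp [h2, h3]
          · simp [h2, h3]
        · rw [if_pos h2]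
          rw [if_neg (fun hP => h2 ⟨hP.1, hP.2.1, hP.2.2.1, hP.2.2.2.1⟩)]
    have hB : ((PySem.List.pyRange (-mr) (mr + 1) 1).flatMap (fun dx =>
        (PySem.List.pyRange (-mr) (mr + 1) 1).filterMap (fun dy =>
          if xb.1 ≤ cell.1 + dx ∧ cell.1 + dx ≤ xb.2 ∧
              yb.1 ≤ cell.2 + dy ∧ cell.2 + dy ≤ yb.2
              ∧ (cell.1 + dx, cell.2 + dy) ∉ occ
          then some (dx, dy) else none)))
        = (nfLB mr).filter (nfCand cell occ xb yb) := by
      rw [nfLB, List.filter_flatMap]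
      congr 1
      funext dx
      rw [filterMap_if_eq_map_filter, List.filter_map]
      rfl
    rw [hA, hB]
    have hperm : ((nfLB mr).filter (nfCand cell occ xb yb)).Perm
        ((nfLA mr).filter (nfCand cell occ xb yb)) := by
      refine (List.perm_ext_iff_of_nodup ((nodup_nfLB mr).filter _) ((nodup_nfLA mr).filter _)).mpr ?_
      intro o
      simp only [List.mem_filter, mem_nfLA, mem_nfLB]
      constructor
      · rintro ⟨⟨h1, h2⟩, hc⟩
        have h0 : ¬ (o.1 = 0 ∧ o.2 = 0) := by
          rintro ⟨e1, e2⟩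
          obtain ⟨a, b⟩ := o
          simp only at e1 e2
          subst e1; subst e2
          simp [nfCand, hocc] at hc
        exact ⟨⟨one_le_cheb h0, cheb_le_iff.mpr ⟨h1, h2⟩⟩, hc⟩
      · rintro ⟨⟨h1, h2⟩, hc⟩
        exact ⟨cheb_le_iff.mp h2, hc⟩
    cases hfb : (nfLB mr).filter (nfCand cell occ xb yb) with
    | nil =>
      have hfa : (nfLA mr).filter (nfCand cell occ xb yb) = [] :=
        (hfb ▸ hperm).symm.eq_nil
      rw [hfa]
      rfl
    | cons c t =>
      cases hfa : (nfLA mr).filter (nfCand cell occ xb yb) with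
      | nil =>
        exact absurd ((hfa ▸ (hfb ▸ hperm) : (c :: t).Perm [])).eq_nil (by simp)
      | cons m tA =>
        have hpw : (m :: tA).Pairwise nfLt := hfa ▸ ((pairwise_nfLA mr).filter _)
        have hm := minF_eq_head (hfa ▸ hfb ▸ hperm) hpw
        simp only [List.head?_cons, Option.map_some]
        rw [hm]
  · rw [if_pos hocc, if_pos hocc]
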